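-- pv_equiv track=rewrite | github.com/dhanuka84/local-secure-rag-invoice | src/invoice/layoutlm_extract.py | _tokens_to_fields
-- ===== SOURCE A (Python) =====
-- from typing import Any, Dict, List, Tuple
-- from typing import Any, Dict, List, Tuple
--
-- def _tokens_to_fields(tokens: List[str], labels: List[str]) -> Tuple[Dict[str, Any], List[Dict[str, Any]]]:
--     """
--     Very simple heuristic mapping from token labels to invoice fields.
--     Assumes labels like B-INVOICE_NO, I-INVOICE_NO, B-TOTAL, etc.
--     Adjust to match your fine-tuned head.
--     """
--     fields = {
--         "invoice_no": None,
--         "date": None,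
--         "subtotal": None,
--         "tax": None,
--         "total": None,
--         "tax_rate": None,
--     }
--
--     buffers = {
--         "INVOICE_NO": [],
--         "DATE": [],
--         "SUBTOTAL": [],
--         "TAX": [],
--         "TOTAL": [],
--         "TAX_RATE": [],
--     }
--
--     for tok, lab in zip(tokens, labels):
--         if lab.startswith("B-") or lab.startswith("I-"):
--             key = lab.split("-", 1)[1]
--             if key in buffers:
--                 clean_tok = tok.replace("##", "")
--                 buffers[key].append(clean_tok)
--
--     def _join(buf: List[str]) -> str | None:
--         if not buf:
--             return None
--         return "".join(buf)
--
--     fields["invoice_no"] = _join(buffers["INVOICE_NO"])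
--     fields["date"] = _join(buffers["DATE"])
--     fields["subtotal"] = _join(buffers["SUBTOTAL"])
--     fields["tax"] = _join(buffers["TAX"])
--     fields["total"] = _join(buffers["TOTAL"])
--     fields["tax_rate"] = _join(buffers["TAX_RATE"])
--
--     # Line items are non-trivial without a table head;
--     # for now we return an empty list or add logic later.
--     line_items: List[Dict[str, Any]] = []
--
--     return fields, line_items
-- ===== SOURCE B (Python) =====
-- from typing import Any, Dict, List, Tuple
--
--
-- def _tokens_to_fields(tokens: List[str], labels: List[str]) -> Tuple[Dict[str, Any], List[Dict[str, Any]]]: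
--     def collect(key: str):
--         parts = [tok.replace("##", "") for tok, lab in zip(tokens, labels)
--                  if (lab.startswith("B-") or lab.startswith("I-"))
--                  and lab.split("-", 1)[1] == key]
--         return "".join(parts) if parts else None
--
--     fields = {
--         "invoice_no": collect("INVOICE_NO"),
--         "date": collect("DATE"),
--         "subtotal": collect("SUBTOTAL"),
--         "tax": collect("TAX"),
--         "total": collect("TOTAL"),
--         "tax_rate": collect("TAX_RATE"),
--     }
--     return fields, []
-- ===== Notes on version B (the rewrite author's own statement) =====
-- stated objective: simpler
-- what changed: Replaces the single mutable-buffer-dict accumulation loop by a per-field helper that filters the zipped token/label stream for one key and joins the matches, removing the buffer dict and the join post-pass.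
import Mathlib
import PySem

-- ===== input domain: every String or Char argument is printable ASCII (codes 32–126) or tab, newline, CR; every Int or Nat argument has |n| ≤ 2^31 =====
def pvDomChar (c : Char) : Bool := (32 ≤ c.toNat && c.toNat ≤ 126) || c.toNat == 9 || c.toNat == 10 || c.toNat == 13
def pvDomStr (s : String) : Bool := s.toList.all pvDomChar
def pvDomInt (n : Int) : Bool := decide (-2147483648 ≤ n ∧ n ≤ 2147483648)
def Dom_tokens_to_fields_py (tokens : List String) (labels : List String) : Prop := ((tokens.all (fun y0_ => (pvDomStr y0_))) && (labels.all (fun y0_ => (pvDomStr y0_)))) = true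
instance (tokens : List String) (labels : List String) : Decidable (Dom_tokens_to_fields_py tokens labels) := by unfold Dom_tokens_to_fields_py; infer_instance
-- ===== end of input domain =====

-- B replaces A's shared accumulation loop over a mutable buffer dict by one per-field
-- filter-and-join helper (simpler decomposition; no buffer dict, no join post-pass).

-- shared helpers (both Pythons compute exactly these subexpressions)
-- tok.replace("##", "")
def pvClean (t : String) : String := PySem.Str.replace t "##" ""
-- lab.split("-", 1)[1]; only evaluated under the B-/I- startswith guard, where the
-- split always has a second element, so the .getD defaults are never reached
def pvKeyOf (lab : String) : String :=
  (PySem.List.pyGet? ((PySem.Str.splitMax? lab "-" 1).getD []) 1).getD ""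

-- ===== PORT A =====
def pvStepA (buf : PySem.Dict String (List String)) (p : String × String) : PySem.Dict String (List String) :=
  if PySem.Str.startswith p.2 "B-" || PySem.Str.startswith p.2 "I-" then
    let key := pvKeyOf p.2
    if buf.contains key then buf.modify key [] (fun l => l ++ [pvClean p.1]) else buf
  else buf

def pvJoinA (b : List String) : Option String :=
  if b = [] then none else some (PySem.Str.join "" b)

def tokens_to_fields_py (tokens : List String) (labels : List String) : (List (String × Option String)) × (List (List (String × String))) :=
  let buffers := (List.zip tokens labels).foldl pvStepA
    (PySem.Dict.ofList [("INVOICE_NO", ([] : List String)), ("DATE", []), ("SUBTOTAL", []), ("TAX", []), ("TOTAL", []), ("TAX_RATE", [])])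
  ([("invoice_no", pvJoinA (buffers.getD "INVOICE_NO" [])),
    ("date", pvJoinA (buffers.getD "DATE" [])),
    ("subtotal", pvJoinA (buffers.getD "SUBTOTAL" [])),
    ("tax", pvJoinA (buffers.getD "TAX" [])),
    ("total", pvJoinA (buffers.getD "TOTAL" [])),
    ("tax_rate", pvJoinA (buffers.getD "TAX_RATE" []))], [])

-- ===== PORT B =====
def pvCollect (tokens labels : List String) (key : String) : Option String :=
  let parts := ((List.zip tokens labels).filter
      (fun p => (PySem.Str.startswith p.2 "B-" || PySem.Str.startswith p.2 "I-") && (pvKeyOf p.2 == key))).map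
      (fun p => pvClean p.1)
  if parts = [] then none else some (PySem.Str.join "" parts)

def tokens_to_fields_py_alt (tokens : List String) (labels : List String) : (List (String × Option String)) × (List (List (String × String))) :=
  ([("invoice_no", pvCollect tokens labels "INVOICE_NO"),
    ("date", pvCollect tokens labels "DATE"),
    ("subtotal", pvCollect tokens labels "SUBTOTAL"),
    ("tax", pvCollect tokens labels "TAX"),
    ("total", pvCollect tokens labels "TOTAL"),
    ("tax_rate", pvCollect tokens labels "TAX_RATE")], [])

-- ===== PRECONDITION & SPEC =====
def Spec_tokens_to_fields_py (tokens : List String) (labels : List String) (out : (List (String × Option String)) × (List (List (String × String)))) : Prop := out = tokens_to_fields_py_alt tokens labels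
instance (tokens : List String) (labels : List String) (out : (List (String × Option String)) × (List (List (String × String)))) : Decidable (Spec_tokens_to_fields_py tokens labels out) := by unfold Spec_tokens_to_fields_py; infer_instance

-- ===== CLAIM (what is proved, stated in full; the proofs are below) =====
def Claim_equal_tokens_to_fields_py : Prop := ∀ (tokens : List String) (labels : List String), Dom_tokens_to_fields_py tokens labels → Spec_tokens_to_fields_py tokens labels (tokens_to_fields_py tokens labels)

-- ===== LEMMAS AND PROOFS =====

-- A's fold, read off at one key K present in the buffer dict, is B's filter-map.
lemma pvFold_getD (ps : List (String × String)) (buf : PySem.Dict String (List String))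
    (K : String) (hK : buf.contains K = true) :
    ((ps.foldl pvStepA buf).getD K []) =
      buf.getD K [] ++ ((ps.filter
        (fun p => (PySem.Str.startswith p.2 "B-" || PySem.Str.startswith p.2 "I-") && (pvKeyOf p.2 == K))).map
        (fun p => pvClean p.1)) := by
  induction ps generalizing buf with
  | nil => simp
  | cons p ps ih =>
    simp only [List.foldl_cons, List.filter_cons]
    by_cases hg : (PySem.Str.startswith p.2 "B-" || PySem.Str.startswith p.2 "I-") = true
    · have hg' : PySem.Chars.startswith p.2.toList ['B', '-'] = true ∨
          PySem.Chars.startswith p.2.toList ['I', '-'] = true := by simpa using hg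
      by_cases hk : pvKeyOf p.2 = K
      · have hc : buf.contains (pvKeyOf p.2) = true := by rw [hk]; exact hK
        have hstep : pvStepA buf p = buf.modify (pvKeyOf p.2) [] (fun l => l ++ [pvClean p.1]) := by
          unfold pvStepA; simp only [hg, hc]; simp
        rw [hstep, ih _ (by rw [PySem.Dict.contains_modify]; simp [hK])]
        have hmod : (buf.modify (pvKeyOf p.2) [] (fun l => l ++ [pvClean p.1])).getD K [] =
            buf.getD K [] ++ [pvClean p.1] := by
          rw [hk]; exact PySem.Dict.getD_modify_self ..
        rw [hmod]
        simp [hg', hk]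
      · have hfilt : ((PySem.Str.startswith p.2 "B-" || PySem.Str.startswith p.2 "I-") && (pvKeyOf p.2 == K)) = false := by
          simp [hk]
        rw [hfilt]
        by_cases hc : buf.contains (pvKeyOf p.2) = true
        · have hstep : pvStepA buf p = buf.modify (pvKeyOf p.2) [] (fun l => l ++ [pvClean p.1]) := by
            unfold pvStepA; simp only [hg, hc]; simp
          rw [hstep, ih _ (by rw [PySem.Dict.contains_modify]; simp [hK])]
          have hne : (buf.modify (pvKeyOf p.2) [] (fun l => l ++ [pvClean p.1])).getD K [] =
              buf.getD K [] := by
            rw [PySem.Dict.getD_modify]; simp [Ne.symm hk]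
          rw [hne]; simp
        · have hc' : buf.contains (pvKeyOf p.2) = false := by simpa using hc
          have hstep : pvStepA buf p = buf := by
            unfold pvStepA; simp only [hg, hc']; simp
          rw [hstep, ih _ hK]; simp
    · have hg' : PySem.Chars.startswith p.2.toList ['B', '-'] = false ∧
          PySem.Chars.startswith p.2.toList ['I', '-'] = false := by
        simpa using hg
      have hstep : pvStepA buf p = buf := by
        unfold pvStepA
        have : (PySem.Str.startswith p.2 "B-" || PySem.Str.startswith p.2 "I-") = false := by
          simpa using hg
        simp only [this]; simp
      have hfilt : ((PySem.Str.startswith p.2 "B-" || PySem.Str.startswith p.2 "I-") && (pvKeyOf p.2 == K)) = false := by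
        simp [hg'.1, hg'.2]
      rw [hstep, hfilt, ih _ hK]; simp

lemma pv_field_eq (tokens labels : List String) (K : String)
    (hK : (PySem.Dict.ofList [("INVOICE_NO", ([] : List String)), ("DATE", []), ("SUBTOTAL", []), ("TAX", []), ("TOTAL", []), ("TAX_RATE", [])]).contains K = true)
    (h0 : (PySem.Dict.ofList [("INVOICE_NO", ([] : List String)), ("DATE", []), ("SUBTOTAL", []), ("TAX", []), ("TOTAL", []), ("TAX_RATE", [])]).getD K [] = []) :
    pvJoinA (((List.zip tokens labels).foldl pvStepA
      (PySem.Dict.ofList [("INVOICE_NO", ([] : List String)), ("DATE", []), ("SUBTOTAL", []), ("TAX", []), ("TOTAL", []), ("TAX_RATE", [])])).getD K []) =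
    pvCollect tokens labels K := by
  rw [pvFold_getD _ _ _ hK, h0]
  simp [pvJoinA, pvCollect]

-- ===== VERDICT (by name: the statement is the Claim_ definition above) =====
theorem tokens_to_fields_py_spec : Claim_equal_tokens_to_fields_py := by
  intro tokens labels _
  show tokens_to_fields_py tokens labels = tokens_to_fields_py_alt tokens labels
  unfold tokens_to_fields_py tokens_to_fields_py_alt
  refine Prod.ext ?_ rfl
  simp only []
  congr 1
  · congr 1; exact pv_field_eq tokens labels "INVOICE_NO" (by decide) (by decide)
  congr 1
  · congr 1; exact pv_field_eq tokens labels "DATE" (by decide) (by decide)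
  congr 1
  · congr 1; exact pv_field_eq tokens labels "SUBTOTAL" (by decide) (by decide)
  congr 1
  · congr 1; exact pv_field_eq tokens labels "TAX" (by decide) (by decide)
  congr 1
  · congr 1; exact pv_field_eq tokens labels "TOTAL" (by decide) (by decide)
  congr 1
  · congr 1; exact pv_field_eq tokens labels "TAX_RATE" (by decide) (by decide)
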